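-- pv_equiv track=rewrite | github.com/nobe0716/problem_solving | codeforces/contests/1195/D1. Submarine in the Rybinsk Sea (easy edition).py | solve
-- ===== SOURCE A (Python) =====
-- _MODER = 998244353
--
-- def solve(n, a):
--     r = 0
--     for e in a:
--         ns = ''
--         for ch in str(e):
--             ns += (ch + ch)
--         r = (r + (int(ns) * n % _MODER)) % _MODER
--     return r
-- ===== SOURCE B (Python) =====
-- _MODER = 998244353
--
-- def solve(n, a):
--     r = 0
--     for e in a:
--         # doubled-digit value computed arithmetically, no string round-trip
--         val = 0
--         p = 1
--         t = e
--         while t > 0: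
--             val += (t % 10) * 11 * p
--             p *= 100
--             t //= 10
--         r = (r + val * n) % _MODER
--     return r
-- ===== Notes on version B (the rewrite author's own statement) =====
-- stated objective: alternative
-- what changed: B computes each element's digit-doubled value arithmetically (extract digits with %10 and //10, add digit*11*100^i) instead of building a doubled string character by character and re-parsing it with int(), and folds val*n into the running sum with a single modulo; it trades C-level int() parsing for a pure-arithmetic digit loop.
import Mathlib
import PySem

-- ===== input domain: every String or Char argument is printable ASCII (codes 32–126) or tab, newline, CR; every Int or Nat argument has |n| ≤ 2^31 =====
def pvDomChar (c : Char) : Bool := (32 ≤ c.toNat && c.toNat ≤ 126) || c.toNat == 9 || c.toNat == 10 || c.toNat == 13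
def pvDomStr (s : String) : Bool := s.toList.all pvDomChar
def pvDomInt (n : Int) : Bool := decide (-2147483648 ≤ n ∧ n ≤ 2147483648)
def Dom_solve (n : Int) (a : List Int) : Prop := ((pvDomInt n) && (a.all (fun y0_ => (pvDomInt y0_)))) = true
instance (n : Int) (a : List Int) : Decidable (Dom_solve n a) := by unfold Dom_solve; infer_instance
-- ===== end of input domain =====

-- B re-implements the per-element digit-doubled value arithmetically (d = t % 10, t //= 10,
-- val += d*11*100^i) instead of A's build-a-doubled-string-and-int()-it; return value only,
-- no mutation on either side.

-- ===== PORT A =====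
-- ns += ch + ch over the characters of str(e)
def pvDub (cs : List Char) : List Char := cs.foldl (fun ns ch => ns ++ [ch, ch]) []

-- decimal value of a digit string, as int() computes it left to right
def pvDigitsVal (cs : List Char) : Int := cs.foldl (fun v c => 10 * v + ((c.toNat : Int) - 48)) 0

-- hand port of int(ns): exact on nonempty all-digit strings — the only strings A's loop
-- produces under Pre_solve (elements ≥ 0, so str(e) is pure digits); none = ValueError.
def pvIntDigits? (cs : List Char) : Option Int :=
  if cs ≠ [] ∧ cs.all Char.isDigit then some (pvDigitsVal cs) else none

def solve (n : Int) (a : List Int) : Int :=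
  a.foldl
    (fun r e =>
      PySem.Int.mod
        (r + PySem.Int.mod ((pvIntDigits? (pvDub (PySem.Int.toChars e))).getD 0 * n) 998244353)
        998244353)
    0

-- ===== PORT B =====
-- termination of the digit-extraction loop: t //= 10 shrinks a positive t
theorem pvFloordiv10_lt (t : Int) (h : 0 < t) : (PySem.Int.floordiv t 10).toNat < t.toNat := by
  rw [PySem.Int.floordiv_eq_ediv_of_pos (by norm_num)]
  omega

-- while t > 0: val += (t % 10) * 11 * p; p *= 100; t //= 10
def pvSpread (t val p : Int) : Int :=
  if h : 0 < t then
    pvSpread (PySem.Int.floordiv t 10) (val + PySem.Int.mod t 10 * 11 * p) (p * 100)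
  else val
termination_by t.toNat
decreasing_by exact pvFloordiv10_lt t h

def solve_alt (n : Int) (a : List Int) : Int :=
  a.foldl (fun r e => PySem.Int.mod (r + pvSpread e 0 1 * n) 998244353) 0

-- ===== PRECONDITION & SPEC =====
-- A raises ValueError on any negative element (int('--…') fails); Pre_ admits exactly the
-- inputs on which A returns: all elements non-negative.
def Pre_solve (n : Int) (a : List Int) : Prop := ∀ e ∈ a, 0 ≤ e
instance (n : Int) (a : List Int) : Decidable (Pre_solve n a) := by unfold Pre_solve; infer_instance

def pvWitness_solve : Int × List Int := (3, [12, 0, 305])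

def Spec_solve (n : Int) (a : List Int) (out : Int) : Prop := out = solve_alt n a
instance (n : Int) (a : List Int) (out : Int) : Decidable (Spec_solve n a out) := by unfold Spec_solve; infer_instance

-- ===== CLAIM (what is proved, stated in full; the proofs are below) =====
def Claim_equal_solve : Prop := ∀ (n : Int) (a : List Int), Dom_solve n a → Pre_solve n a → Spec_solve n a (solve n a)

-- ===== LEMMAS AND PROOFS =====

-- pvDub is flatMap of char doubling
theorem pvDub_eq_flatMap (cs : List Char) : pvDub cs = cs.flatMap (fun c => [c, c]) := by
  rw [pvDub, PySem.List.foldl_append_eq_flatMap, List.nil_append]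

theorem pvDub_append_singleton (cs : List Char) (c : Char) :
    pvDub (cs ++ [c]) = pvDub cs ++ [c, c] := by
  simp [pvDub_eq_flatMap]

theorem pvDigitsVal_append_pair (cs : List Char) (c : Char) :
    pvDigitsVal (cs ++ [c, c]) = 100 * pvDigitsVal cs + 11 * ((c.toNat : Int) - 48) := by
  simp [pvDigitsVal, List.foldl_append]
  ring

theorem digitChar_isDigit (d : Nat) (h : d < 10) : d.digitChar.isDigit = true := by
  interval_cases d <;> decide

theorem digitChar_val (d : Nat) (h : d < 10) : ((d.digitChar.toNat : Int) - 48) = (d : Int) := by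
  interval_cases d <;> decide

theorem toDigits_ne_nil (m : Nat) : Nat.toDigits 10 m ≠ [] := by
  rw [Nat.toDigits_eq_if (by norm_num)]
  split <;> simp

theorem toDigits_all_digit (m : Nat) : (Nat.toDigits 10 m).all Char.isDigit = true := by
  induction m using Nat.strong_induction_on with
  | _ m IH =>
    rw [Nat.toDigits_eq_if (by norm_num)]
    split
    · next h => simp [digitChar_isDigit m h]
    · next h =>
      have hm : 10 ≤ m := by omega
      simp [List.all_append, IH (m / 10) (by omega), digitChar_isDigit (m % 10) (by omega)]

theorem pvSpread_pos (t val p : Int) (h : 0 < t) :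
    pvSpread t val p =
      pvSpread (PySem.Int.floordiv t 10) (val + PySem.Int.mod t 10 * 11 * p) (p * 100) := by
  rw [pvSpread, dif_pos h]

theorem pvSpread_neg (t val p : Int) (h : ¬ 0 < t) : pvSpread t val p = val := by
  rw [pvSpread, dif_neg h]

-- accumulator characterisation of B's digit loop
theorem pvSpread_acc (k : Nat) : ∀ (t val p : Int), t.toNat ≤ k →
    pvSpread t val p = val + p * pvSpread t 0 1 := by
  induction k with
  | zero =>
    intro t val p h
    have ht : ¬ 0 < t := by omega
    rw [pvSpread_neg t val p ht, pvSpread_neg t 0 1 ht]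
    ring
  | succ k IH =>
    intro t val p h
    by_cases ht : 0 < t
    · have hlt := pvFloordiv10_lt t ht
      have h1 := IH (PySem.Int.floordiv t 10) (val + PySem.Int.mod t 10 * 11 * p) (p * 100) (by omega)
      have h2 := IH (PySem.Int.floordiv t 10) (0 + PySem.Int.mod t 10 * 11 * 1) (1 * 100) (by omega)
      rw [pvSpread_pos t val p ht, pvSpread_pos t 0 1 ht, h1, h2]
      ring
    · rw [pvSpread_neg t val p ht, pvSpread_neg t 0 1 ht]
      ring

-- B's loop on a positive number: peel the last decimal digit
theorem pvSpread_natCast_rec (m : Nat) (h : 0 < m) :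
    pvSpread (m : Int) 0 1 = 11 * ((m % 10 : Nat) : Int) + 100 * pvSpread ((m / 10 : Nat) : Int) 0 1 := by
  have hdiv : PySem.Int.floordiv (m : Int) 10 = ((m / 10 : Nat) : Int) := by
    exact_mod_cast PySem.Int.floordiv_natCast m 10
  have hmod : PySem.Int.mod (m : Int) 10 = ((m % 10 : Nat) : Int) := by
    exact_mod_cast PySem.Int.mod_natCast m 10
  rw [pvSpread_pos _ _ _ (by exact_mod_cast h), hdiv, hmod,
    pvSpread_acc ((m / 10 : Nat) : Int).toNat _ _ _ (le_refl _)]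
  ring

theorem pvSpread_zero : pvSpread 0 0 1 = 0 :=
  pvSpread_neg 0 0 1 (by norm_num)

-- the value of A's doubled digit string equals B's arithmetic digit loop
theorem dub_val (m : Nat) : pvDigitsVal (pvDub (Nat.toDigits 10 m)) = pvSpread (m : Int) 0 1 := by
  induction m using Nat.strong_induction_on with
  | _ m IH =>
    rw [Nat.toDigits_eq_if (by norm_num)]
    split
    · next h =>
      -- single digit: doubled string "dd" has value 11*d
      have h1 : pvDub [m.digitChar] = ([] : List Char) ++ [m.digitChar, m.digitChar] := by
        simp [pvDub_eq_flatMap]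
      rw [h1, pvDigitsVal_append_pair, digitChar_val m h]
      rcases Nat.eq_zero_or_pos m with hm | hm
      · subst hm; simp [pvSpread_zero, pvDigitsVal]
      · rw [pvSpread_natCast_rec m hm]
        have h10 : m % 10 = m := Nat.mod_eq_of_lt h
        have h0 : m / 10 = 0 := Nat.div_eq_of_lt h
        rw [h10, h0]
        simp only [Nat.cast_zero, pvSpread_zero, pvDigitsVal, List.foldl_nil]
        ring
    · next h =>
      have hm : 10 ≤ m := by omega
      rw [pvDub_append_singleton, pvDigitsVal_append_pair, digitChar_val (m % 10) (by omega),
        IH (m / 10) (by omega), pvSpread_natCast_rec m (by omega)]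
      ring

-- per element: A's int(doubled-string) value equals B's pvSpread, for non-negative e
theorem elem_val (e : Int) (h : 0 ≤ e) :
    (pvIntDigits? (pvDub (PySem.Int.toChars e))).getD 0 = pvSpread e 0 1 := by
  have htc : PySem.Int.toChars e = Nat.toDigits 10 e.toNat := by
    simp [PySem.Int.toChars, not_lt.mpr h]
  have hne : pvDub (Nat.toDigits 10 e.toNat) ≠ [] := by
    rw [pvDub_eq_flatMap]
    rcases hl : Nat.toDigits 10 e.toNat with _ | ⟨c, cs⟩
    · exact absurd hl (toDigits_ne_nil e.toNat)
    · simp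
  have hall : (pvDub (Nat.toDigits 10 e.toNat)).all Char.isDigit = true := by
    rw [pvDub_eq_flatMap, List.all_eq_true]
    intro c hc
    simp only [List.mem_flatMap, List.mem_cons, List.not_mem_nil, or_false] at hc
    obtain ⟨d, hd, hcd⟩ := hc
    have := List.all_eq_true.mp (toDigits_all_digit e.toNat) d hd
    rcases hcd with rfl | rfl <;> exact this
  rw [htc, pvIntDigits?, if_pos ⟨hne, hall⟩, Option.getD_some, dub_val e.toNat,
    Int.toNat_of_nonneg h]

-- folding (r + x % M) % M and (r + x) % M agree (M = 998244353 > 0; Python % = emod here)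
theorem pvMod_pos_eq (a : Int) : PySem.Int.mod a 998244353 = a % 998244353 := by
  rw [PySem.Int.mod, Int.fmod_eq_emod, if_pos (Or.inl (by norm_num))]
  ring

theorem mod_fold (r x : Int) :
    PySem.Int.mod (r + PySem.Int.mod x 998244353) 998244353 = PySem.Int.mod (r + x) 998244353 := by
  rw [pvMod_pos_eq, pvMod_pos_eq, pvMod_pos_eq, Int.add_emod r (x % 998244353),
    Int.emod_emod_of_dvd x dvd_rfl, ← Int.add_emod]

theorem fold_eq (n : Int) : ∀ (a : List Int), (∀ e ∈ a, 0 ≤ e) → ∀ (r : Int),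
    a.foldl (fun r e =>
        PySem.Int.mod
          (r + PySem.Int.mod ((pvIntDigits? (pvDub (PySem.Int.toChars e))).getD 0 * n) 998244353)
          998244353) r =
    a.foldl (fun r e => PySem.Int.mod (r + pvSpread e 0 1 * n) 998244353) r := by
  intro a
  induction a with
  | nil => intro _ r; rfl
  | cons e a IH =>
    intro h r
    simp only [List.foldl_cons]
    rw [mod_fold, elem_val e (h e (List.mem_cons_self)), IH (fun x hx => h x (List.mem_cons_of_mem e hx))]

-- ===== VERDICT (by name: the statement is the Claim_ definition above) =====
theorem solve_spec : Claim_equal_solve := by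
  intro n a _ hpre
  unfold Spec_solve solve solve_alt
  exact fold_eq n a hpre 0
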